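-- pv_equiv track=rewrite | github.com/Kasl0/WDI | Cwiczenia 3 - zadania/19.py | funkcja
-- ===== SOURCE A (Python) =====
-- def funkcja(tab):
--     maks = 0
--     for i in range(len(tab)):
--         suma_elementow = 0
--         suma_indeksow = 0
--         for j in range(i, len(tab)):
--             if j > i and tab[j-1] >= tab[j]:
--                 break
--             suma_elementow += tab[j]
--             suma_indeksow += j
--             if suma_elementow == suma_indeksow and maks < j - i + 1:
--                     maks = j - i + 1
--     return maks
-- ===== SOURCE B (Python) =====
-- def funkcja(tab):
--     # One pass: within each maximal strictly increasing run, the condition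
--     # sum(tab[i..j]) == sum(i..j) is P[j+1] == P[i] for the prefix sums P of tab[k]-k;
--     # a first-occurrence dict of prefix values gives the longest match ending at each j.
--     best = 0
--     p = 0
--     first = {0: 0}
--     for j, x in enumerate(tab):
--         if j > 0 and tab[j - 1] >= x:
--             first = {p: j}
--         p += x - j
--         i = first.setdefault(p, j + 1)
--         if j + 1 - i > best:
--             best = j + 1 - i
--     return best
-- ===== Notes on version B (the rewrite author's own statement) =====
-- stated objective: faster
-- what changed: A restarts a fresh scan with running sums from every start index (quadratic on increasing runs); B makes a single pass keeping prefix sums of tab[k]-k and a per-run first-occurrence dict of prefix values, so the longest qualifying subarray ending at each position is found in O(1).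
import Mathlib
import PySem

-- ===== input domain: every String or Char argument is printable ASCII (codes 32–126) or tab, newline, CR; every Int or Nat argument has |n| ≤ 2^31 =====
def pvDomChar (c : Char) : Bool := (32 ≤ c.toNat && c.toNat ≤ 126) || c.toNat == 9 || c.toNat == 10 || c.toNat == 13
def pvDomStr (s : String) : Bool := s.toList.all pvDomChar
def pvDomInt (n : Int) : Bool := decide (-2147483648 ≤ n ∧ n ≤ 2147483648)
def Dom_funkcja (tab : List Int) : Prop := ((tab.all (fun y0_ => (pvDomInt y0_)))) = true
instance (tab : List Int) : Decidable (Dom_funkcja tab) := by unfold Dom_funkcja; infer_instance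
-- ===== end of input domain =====

-- B replaces A's quadratic restart-per-start scan by a single pass using per-run prefix sums of tab[k]-k
-- with a first-occurrence dict; objective: faster (asymptotic on long increasing runs).

-- ===== PORT A =====
-- inner 'for j in range(i, len(tab))' loop with its break, over the list of remaining indices
def funkcjaInner (tab : List Int) (i : Nat) : List Nat → Int → Int → Int → Int
  | [], _, _, maks => maks
  | j :: rest, se, si, maks =>
    if i < j ∧ tab.getD j 0 ≤ tab.getD (j - 1) 0 then maks
    else
      let se' := se + tab.getD j 0
      let si' := si + (j : Int)
      let maks' := if se' = si' ∧ maks < (j : Int) - (i : Int) + 1 then (j : Int) - (i : Int) + 1 else maks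
      funkcjaInner tab i rest se' si' maks'

def funkcja (tab : List Int) : Int :=
  (List.range tab.length).foldl
    (fun maks i => funkcjaInner tab i (List.range' i (tab.length - i)) 0 0 maks) 0

-- ===== PORT B =====
-- one iteration of B's single pass: state (best, p, first)
def altStep (tab : List Int) (st : Int × Int × PySem.Dict Int Int) (jx : Int × Int) :
    Int × Int × PySem.Dict Int Int :=
  let j := jx.1
  let x := jx.2
  let first0 := if 0 < j ∧ x ≤ PySem.List.pyGetD tab (j - 1) 0 then
      (PySem.Dict.empty.insert st.2.1 j) else st.2.2
  let p := st.2.1 + x - j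
  let i := first0.getD p (j + 1)
  let first := first0.setdefault p (j + 1)
  let best := if st.1 < j + 1 - i then j + 1 - i else st.1
  (best, p, first)

def funkcja_alt (tab : List Int) : Int :=
  ((PySem.List.enumerate tab 0).foldl (altStep tab)
    (0, 0, (PySem.Dict.empty : PySem.Dict Int Int).insert 0 0)).1

-- ===== PRECONDITION & SPEC =====
def Spec_funkcja (tab : List Int) (out : Int) : Prop := out = funkcja_alt tab
instance (tab : List Int) (out : Int) : Decidable (Spec_funkcja tab out) := by unfold Spec_funkcja; infer_instance

-- ===== CLAIM (what is proved, stated in full; the proofs are below) =====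
def Claim_equal_funkcja : Prop := ∀ (tab : List Int), Dom_funkcja tab → Spec_funkcja tab (funkcja tab)

-- ===== LEMMAS AND PROOFS =====

-- prefix sums of tab[k] - k
def pvP (tab : List Int) : Nat → Int
  | 0 => 0
  | m + 1 => pvP tab m + (tab.getD m 0 - (m : Int))

-- tab[i..j] strictly increasing (link condition on every interior index)
def Incr (tab : List Int) (i j : Nat) : Prop :=
  ∀ k, i < k → k ≤ j → tab.getD (k - 1) 0 < tab.getD k 0

-- (i, j) is a qualifying subarray
def OkP (tab : List Int) (i j : Nat) : Prop :=
  i ≤ j ∧ j < tab.length ∧ Incr tab i j ∧ pvP tab (j + 1) = pvP tab i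

-- r is the answer: an upper bound on qualifying lengths, attained or zero
def Good (tab : List Int) (r : Int) : Prop :=
  0 ≤ r ∧ (∀ i j, OkP tab i j → (j : Int) - (i : Int) + 1 ≤ r) ∧
    (r = 0 ∨ ∃ i j, OkP tab i j ∧ r = (j : Int) - (i : Int) + 1)

theorem good_unique (tab : List Int) (r1 r2 : Int) (h1 : Good tab r1) (h2 : Good tab r2) :
    r1 = r2 := by
  obtain ⟨h10, h1b, h1w⟩ := h1
  obtain ⟨h20, h2b, h2w⟩ := h2
  have le12 : r1 ≤ r2 := by
    rcases h1w with h | ⟨i, j, hok, hr⟩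
    · omega
    · have := h2b i j hok; omega
  have le21 : r2 ≤ r1 := by
    rcases h2w with h | ⟨i, j, hok, hr⟩
    · omega
    · have := h1b i j hok; omega
  omega


-- Good restricted to pairs starting below t (outer-loop invariant of A)
def Good0 (tab : List Int) (t : Nat) (r : Int) : Prop :=
  0 ≤ r ∧ (∀ i j, i < t → OkP tab i j → (j : Int) - (i : Int) + 1 ≤ r) ∧
    (r = 0 ∨ ∃ i j, OkP tab i j ∧ r = (j : Int) - (i : Int) + 1)

-- characterization of the inner loop of A
theorem innerA_spec (tab : List Int) (i : Nat) :
    ∀ (len j : Nat) (se si m : Int), i ≤ j →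
      se - si = pvP tab j - pvP tab i →
      (m ≤ funkcjaInner tab i (List.range' j len) se si m) ∧
      (∀ j', j ≤ j' → j' < j + len →
        (∀ k, j ≤ k → k ≤ j' → i < k → tab.getD (k - 1) 0 < tab.getD k 0) →
        pvP tab (j' + 1) = pvP tab i →
        (j' : Int) - (i : Int) + 1 ≤ funkcjaInner tab i (List.range' j len) se si m) ∧
      (funkcjaInner tab i (List.range' j len) se si m = m ∨
        ∃ j', j ≤ j' ∧ j' < j + len ∧
          (∀ k, j ≤ k → k ≤ j' → i < k → tab.getD (k - 1) 0 < tab.getD k 0) ∧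
          pvP tab (j' + 1) = pvP tab i ∧
          funkcjaInner tab i (List.range' j len) se si m = (j' : Int) - (i : Int) + 1) := by
  intro len
  induction len with
  | zero =>
    intro j se si m hij hsum
    refine ⟨le_refl m, ?_, Or.inl rfl⟩
    intro j' _ h
    omega
  | succ len ih =>
    intro j se si m hij hsum
    rw [List.range'_succ]
    by_cases hbr : i < j ∧ tab.getD j 0 ≤ tab.getD (j - 1) 0
    · -- break
      have hrw : funkcjaInner tab i (j :: List.range' (j+1) len) se si m = m := by
        simp only [funkcjaInner]
        rw [if_pos hbr]
      rw [hrw]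
      refine ⟨le_refl m, ?_, Or.inl rfl⟩
      intro j' hjj' _ hcond _
      exact absurd (hcond j (le_refl j) hjj' hbr.1) (by omega)
    · -- no break
      have hstep : i = j ∨ tab.getD (j - 1) 0 < tab.getD j 0 := by
        by_cases h : i < j
        · right
          by_contra hc
          exact hbr ⟨h, by omega⟩
        · left; omega
      have hrec : funkcjaInner tab i (j :: List.range' (j+1) len) se si m =
          funkcjaInner tab i (List.range' (j+1) len) (se + tab.getD j 0) (si + (j : Int))
            (if se + tab.getD j 0 = si + (j : Int) ∧ m < (j : Int) - (i : Int) + 1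
              then (j : Int) - (i : Int) + 1 else m) := by
        simp only [funkcjaInner]
        rw [if_neg hbr]
      have hPj : pvP tab (j + 1) = pvP tab j + (tab.getD j 0 - (j : Int)) := rfl
      generalize hm' : (if se + tab.getD j 0 = si + (j : Int) ∧ m < (j : Int) - (i : Int) + 1
          then (j : Int) - (i : Int) + 1 else m) = m' at hrec
      have hmm' : m ≤ m' := by rw [← hm']; split <;> omega
      have hcase : m' = m ∨ (se + tab.getD j 0 = si + (j : Int) ∧ m' = (j : Int) - (i : Int) + 1) := by
        rw [← hm']; split
        · exact Or.inr ⟨(by assumption : _ ∧ _).1, rfl⟩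
        · exact Or.inl rfl
      have hup : se + tab.getD j 0 = si + (j : Int) → (j : Int) - (i : Int) + 1 ≤ m' := by
        intro he
        rw [← hm']; split <;> omega
      have hsum' : (se + tab.getD j 0) - (si + (j : Int)) = pvP tab (j + 1) - pvP tab i := by
        omega
      obtain ⟨iha, ihb, ihc⟩ := ih (j + 1) (se + tab.getD j 0) (si + (j : Int)) m' (by omega) hsum'
      rw [hrec]
      refine ⟨le_trans hmm' iha, ?_, ?_⟩
      · -- bound
        intro j' hjj' hlt hcond hP
        by_cases hj' : j' = j
        · rw [hj'] at hP ⊢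
          have h1 : (j : Int) - (i : Int) + 1 ≤ m' := hup (by omega)
          omega
        · exact ihb j' (by omega) (by omega) (fun k hk1 hk2 hk3 => hcond k (by omega) hk2 hk3) hP
      · -- witness
        rcases ihc with heqm | ⟨j', h1, h2, h3, h4, h5⟩
        · rcases hcase with hc | ⟨hc1, hc2⟩
          · exact Or.inl (heqm.trans hc)
          · right
            refine ⟨j, le_refl j, by omega, ?_, by omega, heqm.trans hc2⟩
            intro k hk1 hk2 hk3
            have hkj : k = j := by omega
            rw [hkj]
            rcases hstep with h | h
            · omega
            · exact h
        · right
          refine ⟨j', by omega, by omega, ?_, h4, h5⟩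
          intro k hk1 hk2 hk3
          by_cases hk : k = j
          · rw [hk]
            rcases hstep with h | h
            · omega
            · exact h
          · exact h3 k (by omega) hk2 hk3

theorem A_fold (tab : List Int) :
    ∀ t, t ≤ tab.length →
      Good0 tab t ((List.range t).foldl
        (fun maks i => funkcjaInner tab i (List.range' i (tab.length - i)) 0 0 maks) 0) := by
  intro t
  induction t with
  | zero => intro _; exact ⟨le_refl 0, fun i j h => absurd h (by omega), Or.inl rfl⟩
  | succ t ih =>
    intro ht
    obtain ⟨h0, hb, hw⟩ := ih (by omega)
    rw [List.range_succ, List.foldl_append, List.foldl_cons, List.foldl_nil]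
    set r := (List.range t).foldl
        (fun maks i => funkcjaInner tab i (List.range' i (tab.length - i)) 0 0 maks) 0 with hr
    obtain ⟨sa, sb, sc⟩ := innerA_spec tab t (tab.length - t) t 0 0 r (le_refl t) (by omega)
    refine ⟨le_trans h0 sa, ?_, ?_⟩
    · intro i j hi hok
      by_cases hit : i < t
      · exact le_trans (hb i j hit hok) sa
      · have hieq : i = t := by omega
        subst hieq
        obtain ⟨hij, hjn, hincr, hP⟩ := hok
        exact sb j hij (by omega) (fun k hk1 hk2 hk3 => hincr k hk3 hk2) hP
    · rcases sc with heq | ⟨j', h1, h2, h3, h4, h5⟩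
      · rw [heq]; exact hw
      · exact Or.inr ⟨t, j', ⟨h1, by omega, fun k hk1 hk2 => h3 k (by omega) hk2 hk1, h4⟩, h5⟩

theorem A_good (tab : List Int) : Good tab (funkcja tab) := by
  obtain ⟨h0, hb, hw⟩ := A_fold tab tab.length (le_refl _)
  refine ⟨h0, fun i j hok => hb i j ?_ hok, hw⟩
  have := hok.1
  have := hok.2.1
  omega

-- run starts: rs tab j = start of the strictly increasing run after j processed elements
def rs (tab : List Int) : Nat → Nat
  | 0 => 0
  | j + 1 => if 0 < j ∧ tab.getD j 0 ≤ tab.getD (j - 1) 0 then j else rs tab j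

theorem rs_le (tab : List Int) : ∀ j, rs tab j ≤ j := by
  intro j
  induction j with
  | zero => exact le_refl 0
  | succ j ih => unfold rs; split <;> omega

theorem rs_le' (tab : List Int) (j : Nat) : rs tab (j + 1) ≤ j := by
  have := rs_le tab j
  unfold rs; split <;> omega

theorem rs_incr (tab : List Int) : ∀ j k, rs tab (j + 1) < k → k ≤ j →
    tab.getD (k - 1) 0 < tab.getD k 0 := by
  intro j
  induction j with
  | zero => intro k h1 h2; omega
  | succ j ih =>
    intro k h1 h2
    rw [show rs tab (j + 1 + 1) = if 0 < j + 1 ∧ tab.getD (j + 1) 0 ≤ tab.getD (j + 1 - 1) 0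
        then j + 1 else rs tab (j + 1) from rfl] at h1
    split at h1
    · omega
    · rename_i hc
      have hlt : tab.getD j 0 < tab.getD (j + 1) 0 := by
        by_contra hcc
        exact hc ⟨by omega, by simpa using le_of_not_gt hcc⟩
      by_cases hk : k = j + 1
      · rw [hk]; simpa using hlt
      · exact ih k h1 (by omega)

theorem rs_break (tab : List Int) : ∀ j, rs tab j = 0 ∨
    (0 < rs tab j ∧ tab.getD (rs tab j) 0 ≤ tab.getD (rs tab j - 1) 0) := by
  intro j
  induction j with
  | zero => exact Or.inl rfl
  | succ j ih =>
    rw [show rs tab (j + 1) = if 0 < j ∧ tab.getD j 0 ≤ tab.getD (j - 1) 0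
        then j else rs tab j from rfl]
    split
    · rename_i hc
      exact Or.inr ⟨hc.1, hc.2⟩
    · exact ih

theorem ok_iff (tab : List Int) (i j : Nat) (hj : j < tab.length) :
    OkP tab i j ↔ rs tab (j + 1) ≤ i ∧ i ≤ j ∧ pvP tab (j + 1) = pvP tab i := by
  constructor
  · rintro ⟨hij, _, hincr, hP⟩
    refine ⟨?_, hij, hP⟩
    by_contra hcon
    rcases rs_break tab (j + 1) with h0 | ⟨hpos, hle⟩
    · omega
    · have hrle := rs_le' tab j
      exact absurd (hincr (rs tab (j + 1)) (by omega) (by omega)) (by omega)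
  · rintro ⟨h1, h2, h3⟩
    exact ⟨h2, hj, fun k hk1 hk2 => rs_incr tab j k (by omega) hk2, h3⟩

-- dict invariant: every binding is (prefix value of some m in [s, j]) ↦ m,
-- and every m in [s, j] is bound at key pvP m with value ≤ m
def DInv (tab : List Int) (first : PySem.Dict Int Int) (s j : Nat) : Prop :=
  (∀ v mi, first.get? v = some mi →
    ∃ m : Nat, mi = (m : Int) ∧ s ≤ m ∧ m ≤ j ∧ pvP tab m = v) ∧
  (∀ m : Nat, s ≤ m → m ≤ j → ∃ mi : Int, first.get? (pvP tab m) = some mi ∧ mi ≤ (m : Int))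

-- loop invariant of B after j processed elements
def BInv (tab : List Int) (st : Int × Int × PySem.Dict Int Int) (j : Nat) : Prop :=
  0 ≤ st.1 ∧ st.2.1 = pvP tab j ∧ DInv tab st.2.2 (rs tab j) j ∧
  (∀ i j', OkP tab i j' → j' < j → (j' : Int) - (i : Int) + 1 ≤ st.1) ∧
  (st.1 = 0 ∨ ∃ i j', OkP tab i j' ∧ st.1 = (j' : Int) - (i : Int) + 1)

theorem B_step (tab : List Int) (j : Nat) (hj : j < tab.length)
    (best p : Int) (first : PySem.Dict Int Int)
    (h : BInv tab (best, p, first) j) :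
    BInv tab (altStep tab (best, p, first) ((j : Int), tab.getD j 0)) (j + 1) := by
  obtain ⟨hb0, hp, ⟨hds, hdc⟩, hbnd, hwit⟩ := h
  simp only at hb0 hp hbnd hwit hds hdc
  have hPj1 : pvP tab (j + 1) = pvP tab j + (tab.getD j 0 - (j : Int)) := rfl
  have hrs1 : rs tab (j + 1) = if 0 < j ∧ tab.getD j 0 ≤ tab.getD (j - 1) 0
      then j else rs tab j := rfl
  have hrsle : rs tab (j + 1) ≤ j := rs_le' tab j
  -- the reset condition of the port equals the Nat-level condition
  have hcond : (0 < (j : Int) ∧ tab.getD j 0 ≤ PySem.List.pyGetD tab ((j : Int) - 1) 0)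
      ↔ (0 < j ∧ tab.getD j 0 ≤ tab.getD (j - 1) 0) := by
    by_cases hjz : 0 < j
    · have hcast : ((j : Int) - 1) = ((j - 1 : Nat) : Int) := by omega
      rw [hcast, PySem.List.pyGetD_natCast]
      constructor
      · rintro ⟨_, h2⟩; exact ⟨hjz, h2⟩
      · rintro ⟨_, h2⟩; exact ⟨by omega, h2⟩
    · constructor
      · rintro ⟨h1, _⟩; omega
      · rintro ⟨h1, _⟩; omega
  simp only [altStep]
  set first0 := if 0 < (j : Int) ∧ tab.getD j 0 ≤ PySem.List.pyGetD tab ((j : Int) - 1) 0 then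
      (PySem.Dict.empty.insert p (j : Int)) else first with hfirst0
  -- first0 satisfies the dict invariant for run start rs (j+1) up to j
  have hd0 : DInv tab first0 (rs tab (j + 1)) j := by
    rw [hfirst0]
    by_cases hc : 0 < j ∧ tab.getD j 0 ≤ tab.getD (j - 1) 0
    · rw [if_pos (hcond.mpr hc), hrs1, if_pos hc]
      constructor
      · intro v mi hget
        rw [PySem.Dict.get?_insert] at hget
        split at hget
        · rename_i hv
          exact ⟨j, by simpa using hget.symm, le_refl j, le_refl j, by rw [hv, hp]⟩
        · rw [PySem.Dict.get?_empty] at hget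
          exact absurd hget (by simp)
      · intro m hm1 hm2
        have hmj : m = j := by omega
        rw [hmj, ← hp, PySem.Dict.get?_insert, if_pos rfl]
        exact ⟨(j : Int), rfl, le_refl _⟩
    · rw [if_neg (fun hcc => hc (hcond.mp hcc)), hrs1, if_neg hc]
      exact ⟨hds, hdc⟩
  -- the new prefix value is pvP (j+1)
  have hp' : p + tab.getD j 0 - (j : Int) = pvP tab (j + 1) := by
    rw [hPj1, hp]; ring
  rw [hp']
  -- case on whether pvP (j+1) is already a key
  rcases hgo : first0.get? (pvP tab (j + 1)) with _ | mi
  · -- not found: i = j + 1, best unchanged, key inserted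
    have hcont : first0.contains (pvP tab (j + 1)) = false := by
      rw [PySem.Dict.contains_eq_isSome_get?, hgo]; rfl
    rw [PySem.Dict.setdefault_of_not_contains _ _ hcont,
        PySem.Dict.getD_eq_get?_getD, hgo]
    simp only [Option.getD]
    rw [if_neg (by omega)]
    refine ⟨hb0, rfl, ?_, ?_, hwit⟩
    · -- dict invariant extended to j+1
      constructor
      · intro v mi hget
        rw [PySem.Dict.get?_insert] at hget
        split at hget
        · rename_i hv
          refine ⟨j + 1, by simpa using hget.symm, by omega, le_refl _, by rw [hv]⟩
        · obtain ⟨m, hm1, hm2, hm3, hm4⟩ := hd0.1 v mi hget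
          exact ⟨m, hm1, hm2, by omega, hm4⟩
      · intro m hm1 hm2
        by_cases hmj : m = j + 1
        · rw [hmj, PySem.Dict.get?_insert, if_pos rfl]
          exact ⟨_, rfl, by omega⟩
        · have hne : pvP tab m ≠ pvP tab (j + 1) := by
            intro he
            obtain ⟨mi, hmi, _⟩ := hd0.2 m hm1 (by omega)
            rw [he, hgo] at hmi
            exact absurd hmi (by simp)
          rw [PySem.Dict.get?_insert, if_neg hne]
          exact hd0.2 m hm1 (by omega)
    · -- bound: no qualifying pair can end at j
      intro i0 j0 hok hj0
      by_cases hj0j : j0 < j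
      · exact hbnd i0 j0 hok hj0j
      · have hj0e : j0 = j := by omega
        rw [hj0e] at hok
        obtain ⟨hrs, hile, hPe⟩ := (ok_iff tab i0 j hj).mp hok
        obtain ⟨mi, hmi, _⟩ := hd0.2 i0 hrs hile
        rw [← hPe, hgo] at hmi
        exact absurd hmi (by simp)
  · -- found: candidate pair (m, j)
    obtain ⟨m, hm1, hm2, hm3, hm4⟩ := hd0.1 _ mi hgo
    have hcont : first0.contains (pvP tab (j + 1)) = true := by
      rw [PySem.Dict.contains_eq_isSome_get?, hgo]; rfl
    rw [PySem.Dict.setdefault_of_contains _ _ hcont,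
        PySem.Dict.getD_eq_get?_getD, hgo]
    simp only [Option.getD]
    have hokm : OkP tab m j := (ok_iff tab m j hj).mpr ⟨hm2, hm3, hm4.symm⟩
    constructor
    · split <;> omega
    · refine ⟨rfl, ?_, ?_, ?_⟩
      · -- dict invariant: unchanged dict, range widened
        constructor
        · intro v mi' hget
          obtain ⟨m', h1, h2, h3, h4⟩ := hd0.1 v mi' hget
          exact ⟨m', h1, h2, by omega, h4⟩
        · intro m' hm'1 hm'2
          by_cases hm'j : m' = j + 1
          · rw [hm'j, hgo]
            exact ⟨mi, rfl, by omega⟩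
          · exact hd0.2 m' hm'1 (by omega)
      · -- bound
        intro i0 j0 hok hj0
        by_cases hj0j : j0 < j
        · have := hbnd i0 j0 hok hj0j
          split <;> omega
        · have hj0e : j0 = j := by omega
          rw [hj0e] at hok ⊢
          obtain ⟨hrs, hile, hPe⟩ := (ok_iff tab i0 j hj).mp hok
          obtain ⟨mi', hmi', hle'⟩ := hd0.2 i0 hrs hile
          rw [← hPe, hgo] at hmi'
          have : mi = mi' := by
            injection hmi'
          split <;> omega
      · -- witness
        split
        · exact Or.inr ⟨m, j, hokm, by omega⟩
        · exact hwit

theorem B_fold (tab : List Int) : ∀ (xs : List Int) (j : Nat) (st : Int × Int × PySem.Dict Int Int),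
    xs = tab.drop j → BInv tab st j →
    BInv tab ((PySem.List.enumerate xs (j : Int)).foldl (altStep tab) st) (j + xs.length) := by
  intro xs
  induction xs with
  | nil =>
    intro j st _ h
    simpa [PySem.List.enumerate_nil] using h
  | cons x xs ih =>
    intro j st hdrop h
    have hjlt : j < tab.length := by
      by_contra hc
      rw [List.drop_eq_nil_of_le (by omega)] at hdrop
      exact absurd hdrop.symm (by simp)
    have hx : tab.getD j 0 = x := by
      have h1 : (tab.drop j).head? = tab[j]? := List.head?_drop
      rw [← hdrop] at h1
      simp at h1
      rw [List.getD_eq_getElem?_getD, ← h1]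
      rfl
    have hxs : xs = tab.drop (j + 1) := by
      have h1 : (tab.drop j).tail = tab.drop (j + 1) := List.tail_drop
      rw [← hdrop] at h1
      simpa using h1
    rw [PySem.List.enumerate_cons, List.foldl_cons]
    obtain ⟨best, p, first⟩ := st
    have hstep := B_step tab j hjlt best p first h
    rw [hx] at hstep
    have hcast : ((j : Int) + 1) = ((j + 1 : Nat) : Int) := by push_cast; ring
    rw [hcast]
    have := ih (j + 1) (altStep tab (best, p, first) ((j : Int), x)) hxs hstep
    have hlen : j + (x :: xs).length = (j + 1) + xs.length := by
      simp [List.length_cons]; omega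
    rw [hlen]
    exact this

theorem B_good (tab : List Int) : Good tab (funkcja_alt tab) := by
  have hinit : BInv tab (0, 0, (PySem.Dict.empty : PySem.Dict Int Int).insert 0 0) 0 := by
    refine ⟨le_refl 0, rfl, ?_, ?_, Or.inl rfl⟩
    · constructor
      · intro v mi hget
        rw [PySem.Dict.get?_insert] at hget
        split at hget
        · rename_i hv
          exact ⟨0, by simpa using hget.symm, le_refl 0, le_refl 0, by rw [hv]; rfl⟩
        · rw [PySem.Dict.get?_empty] at hget
          exact absurd hget (by simp)
      · intro m hm1 hm2
        have hm0 : m = 0 := by omega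
        rw [hm0, show pvP tab 0 = 0 from rfl, PySem.Dict.get?_insert, if_pos rfl]
        exact ⟨0, rfl, le_refl 0⟩
    · intro i j' _ h
      omega
  have h := B_fold tab tab 0 (0, 0, (PySem.Dict.empty : PySem.Dict Int Int).insert 0 0) rfl hinit
  rw [show ((0 : Nat) : Int) = (0 : Int) from rfl] at h
  obtain ⟨h0, _, _, hbnd, hwit⟩ := h
  unfold funkcja_alt
  refine ⟨h0, ?_, hwit⟩
  intro i j hok
  exact hbnd i j hok (by simpa using hok.2.1)


-- ===== VERDICT (by name: the statement is the Claim_ definition above) =====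
theorem funkcja_spec : Claim_equal_funkcja := by
  intro tab _
  unfold Spec_funkcja
  exact good_unique tab (funkcja tab) (funkcja_alt tab) (A_good tab) (B_good tab)
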